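-- pv_equiv track=rewrite | github.com/Cracko298/MinVideo | python/min_video.py | dimension_split
-- ===== SOURCE A (Python) =====
-- import math
--
-- VIDEO_SIZE_BYTE_LENGTH = 8
--
-- def dimension_split(dimension: int) -> list[int]:
--     res = []
--
--     if dimension != 0:
--         count = math.ceil(dimension / 255)
--         res = [dimension // count] * count
--
--         for i in range(dimension % count):
--             res[i] += 1
--
--
--     while len(res) < VIDEO_SIZE_BYTE_LENGTH:
--         res.append(0)
--
--     return res
-- ===== SOURCE B (Python) =====
-- VIDEO_SIZE_BYTE_LENGTH = 8
--
-- def dimension_split(dimension):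
--     # greedy split: each chunk is the ceiling of what remains over the slots left
--     res = []
--     if dimension != 0:
--         slots = -(-dimension // 255)  # == math.ceil(dimension / 255)
--         rem = dimension
--         while slots > 0:
--             chunk = -(-rem // slots)
--             res.append(chunk)
--             rem -= chunk
--             slots -= 1
--     res += [0] * (VIDEO_SIZE_BYTE_LENGTH - len(res))
--     return res
-- ===== Notes on version B (the rewrite author's own statement) =====
-- stated objective: alternative
-- what changed: B replaces A's replicate-q-then-increment-the-first-r-entries scheme with a greedy loop that emits each chunk as the ceiling of the remaining amount over the slots left, maintaining (remaining, slots) instead of (q, r); padding is a single arithmetic list extension instead of a while-append loop.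
import Mathlib
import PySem

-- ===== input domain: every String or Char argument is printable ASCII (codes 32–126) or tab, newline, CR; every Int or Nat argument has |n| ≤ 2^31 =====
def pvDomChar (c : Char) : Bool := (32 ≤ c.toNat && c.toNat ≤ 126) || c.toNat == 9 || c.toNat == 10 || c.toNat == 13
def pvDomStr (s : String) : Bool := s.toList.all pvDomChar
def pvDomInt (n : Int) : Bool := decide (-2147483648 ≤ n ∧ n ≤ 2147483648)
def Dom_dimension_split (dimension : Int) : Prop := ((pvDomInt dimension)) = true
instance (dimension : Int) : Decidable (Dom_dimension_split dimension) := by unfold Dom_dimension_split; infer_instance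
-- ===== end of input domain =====

-- B replaces A's replicate-q-then-increment-first-r scheme by a greedy loop emitting
-- ceil(remaining / slots_left) per step, and the while-append padding by one arithmetic
-- extension; objective: alternative (same cost, different algorithm).

-- ===== PORT A =====
-- while len(res) < 8: res.append(0)
def pvPadWhile (res : List Int) : List Int :=
  if _h : res.length < 8 then pvPadWhile (res ++ [0]) else res
termination_by 8 - res.length
decreasing_by simp; omega

def dimension_split (dimension : Int) : List Int :=
  let res : List Int := []
  let res :=
    if dimension ≠ 0 then
      -- math.ceil(dimension / 255): exact as (dimension + 254) // 255; the float division is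
      -- correctly rounded and |dimension| ≤ 2^31 keeps it ≥ 1/255 away from a wrong integer side
      let count := PySem.Int.floordiv (dimension + 254) 255
      let base := List.replicate count.toNat (PySem.Int.floordiv dimension count)
      -- for i in range(dimension % count): res[i] += 1   (i is always in range here)
      (PySem.List.pyRange 0 (PySem.Int.mod dimension count) 1).foldl
        (fun r i => r.set i.toNat (r.getD i.toNat 0 + 1)) base
    else res
  pvPadWhile res

-- ===== PORT B =====
-- while slots > 0: chunk = -(-rem // slots); res.append(chunk); rem -= chunk; slots -= 1
def pvGreedy (slots rem : Int) : List Int :=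
  if 0 < slots then
    let chunk := -(PySem.Int.floordiv (-rem) slots)
    chunk :: pvGreedy (slots - 1) (rem - chunk)
  else []
termination_by slots.toNat
decreasing_by omega

def dimension_split_alt (dimension : Int) : List Int :=
  let res : List Int := []
  let res :=
    if dimension ≠ 0 then
      -- slots = -(-dimension // 255) == math.ceil(dimension / 255)
      pvGreedy (-(PySem.Int.floordiv (-dimension) 255)) dimension
    else res
  -- res += [0] * (8 - len(res))
  res ++ List.replicate (8 - res.length) 0

-- ===== PRECONDITION & SPEC =====
-- Pre_ excludes the small negative dimensions (between -254 and -1): there A's chunk count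
-- vanishes and A raises ZeroDivisionError on the division by it.
def Pre_dimension_split (dimension : Int) : Prop := 0 ≤ dimension ∨ dimension ≤ -255
instance (dimension : Int) : Decidable (Pre_dimension_split dimension) := by unfold Pre_dimension_split; infer_instance
def pvWitness_dimension_split : Int := (700)

def Spec_dimension_split (dimension : Int) (out : List Int) : Prop := out = dimension_split_alt dimension
instance (dimension : Int) (out : List Int) : Decidable (Spec_dimension_split dimension out) := by unfold Spec_dimension_split; infer_instance

-- ===== CLAIM (what is proved, stated in full; the proofs are below) =====
def Claim_equal_dimension_split : Prop := ∀ (dimension : Int), Dom_dimension_split dimension → Pre_dimension_split dimension → Spec_dimension_split dimension (dimension_split dimension)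

-- ===== LEMMAS AND PROOFS =====

theorem pvPadWhile_eq (l : List Int) : pvPadWhile l = l ++ List.replicate (8 - l.length) 0 := by
  fun_induction pvPadWhile l with
  | case1 l h ih =>
      rw [ih, List.append_assoc]
      congr 1
      have hlen : (l ++ [(0:Int)]).length = l.length + 1 := by simp
      rw [hlen]
      have h8 : 8 - l.length = (8 - (l.length + 1)) + 1 := by omega
      rw [h8, List.replicate_succ]
      rfl
  | case2 l h => simp at h; simp [Nat.sub_eq_zero_of_le h]

-- incrementing the first k entries of a replicate (A's remainder loop)
theorem pvIncLoop (n : Nat) (q : Int) (k : Nat) (hk : k ≤ n) :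
    (PySem.List.pyRange 0 (k : Int) 1).foldl
      (fun r i => r.set i.toNat (r.getD i.toNat 0 + 1)) (List.replicate n q)
    = List.replicate k (q + 1) ++ List.replicate (n - k) q := by
  induction k with
  | zero => simp [PySem.List.pyRange_one_eq_nil]
  | succ k ih =>
      have hk' : k ≤ n := Nat.le_of_succ_le hk
      have hsplit : (PySem.List.pyRange 0 ((k + 1 : Nat) : Int) 1)
          = PySem.List.pyRange 0 (k : Int) 1 ++ [(k : Int)] := by
        have := PySem.List.pyRange_one_succ_right (a := 0) (b := (k : Int)) (by positivity)
        push_cast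
        push_cast at this
        exact this
      rw [hsplit, List.foldl_append, ih hk']
      simp only [List.foldl]
      have hlen : (List.replicate k (q + 1)).length = k := by simp
      have hnk : n - k = (n - (k + 1)) + 1 := by omega
      rw [hnk, List.replicate_succ]
      have htoNat : ((k : Int)).toNat = k := by simp
      rw [htoNat]
      rw [List.getD_eq_getElem?_getD, List.getElem?_append_right (by simp)]
      simp only [hlen, Nat.sub_self, List.getElem?_cons_zero, Option.getD_some]
      rw [List.set_append_right _ _ (by simp [hlen])]
      simp only [hlen, Nat.sub_self, List.set_cons_zero]
      rw [List.replicate_succ']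
      simp

-- B's greedy loop realises the front-loaded distribution: from rem = q*n + r with
-- 0 ≤ r < n it emits r chunks of q+1 followed by n-r chunks of q.
theorem pvGreedy_eq (n : Nat) (q r : Int) (hr0 : 0 ≤ r) (hrn : r < n) :
    pvGreedy (n : Int) (q * n + r)
      = List.replicate r.toNat (q + 1) ++ List.replicate ((n : Int) - r).toNat q := by
  induction n generalizing q r with
  | zero => omega
  | succ m ih =>
      have hpos : (0 : Int) < ((m + 1 : Nat) : Int) := by positivity
      rw [pvGreedy, if_pos hpos]
      by_cases hr : r = 0
      · subst hr
        have hchunk : -(PySem.Int.floordiv (-(q * ((m + 1 : Nat) : Int) + 0)) ((m + 1 : Nat) : Int)) = q := by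
          have := (PySem.Int.floordiv_eq_iff_of_pos (a := -(q * ((m + 1 : Nat) : Int) + 0))
            (b := ((m + 1 : Nat) : Int)) (q := -q) hpos).mpr (by push_cast; constructor <;> nlinarith)
          omega
        simp only [hchunk]
        by_cases hm : m = 0
        · subst hm
          rw [pvGreedy]
          norm_num
        · have hrec := ih q 0 le_rfl (by omega)
          have harg : q * ((m + 1 : Nat) : Int) + 0 - q = q * (m : Int) + 0 := by push_cast; ring
          have hs : ((m + 1 : Nat) : Int) - 1 = ((m : Nat) : Int) := by push_cast; ring
          rw [harg, hs, hrec]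
          simp only [sub_zero]
          simp [List.replicate_succ]
      · have hr1 : 1 ≤ r := by omega
        have hchunk : -(PySem.Int.floordiv (-(q * ((m + 1 : Nat) : Int) + r)) ((m + 1 : Nat) : Int)) = q + 1 := by
          have := (PySem.Int.floordiv_eq_iff_of_pos (a := -(q * ((m + 1 : Nat) : Int) + r))
            (b := ((m + 1 : Nat) : Int)) (q := -q - 1) hpos).mpr (by push_cast at hrn ⊢; constructor <;> nlinarith)
          omega
        simp only [hchunk]
        have hrm : r - 1 < (m : Int) := by push_cast at hrn ⊢; omega
        have hrec := ih q (r - 1) (by omega) (by exact_mod_cast hrm)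
        have harg : q * ((m + 1 : Nat) : Int) + r - (q + 1) = q * (m : Int) + (r - 1) := by push_cast; ring
        have hs : ((m + 1 : Nat) : Int) - 1 = ((m : Nat) : Int) := by push_cast; ring
        rw [harg, hs, hrec]
        have h1 : r.toNat = (r - 1).toNat + 1 := by omega
        have h2 : (((m + 1 : Nat) : Int) - r).toNat = ((m : Int) - (r - 1)).toNat := by push_cast; omega
        rw [h1, h2, List.replicate_succ]
        simp

-- the two ceil-division spellings agree
theorem pvCeil_eq (d : Int) : -(PySem.Int.floordiv (-d) 255) = PySem.Int.floordiv (d + 254) 255 := by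
  set c := PySem.Int.floordiv (d + 254) 255 with hc
  have h := (PySem.Int.floordiv_eq_iff_of_pos (a := d + 254) (b := 255) (q := c) (by norm_num)).mp hc.symm
  have := (PySem.Int.floordiv_eq_iff_of_pos (a := -d) (b := 255) (q := -c) (by norm_num)).mpr (by omega)
  omega

-- ===== VERDICT =====
theorem dimension_split_spec : Claim_equal_dimension_split := by
  intro d _ hpre
  unfold Spec_dimension_split dimension_split dimension_split_alt
  by_cases h0 : d = 0
  · subst h0
    simp [pvPadWhile_eq]
  · simp only [ne_eq, h0, not_false_eq_true, if_pos, pvCeil_eq]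
    set count := PySem.Int.floordiv (d + 254) 255 with hcnt
    set q := PySem.Int.floordiv d count with hq
    set r := PySem.Int.mod d count with hr
    rcases hpre with hpos | hneg
    · -- d > 0: count ≥ 1, 0 ≤ r < count; both sides are the front-loaded distribution
      have hd1 : 1 ≤ d := by omega
      have hcount : 1 ≤ count := by
        rw [hcnt]
        exact (PySem.Int.le_floordiv_iff_mul_le (a := d + 254) (b := 255) (q := 1) (by norm_num)).mpr (by omega)
      have hr0 : 0 ≤ r := PySem.Int.mod_nonneg d (by omega)
      have hrlt : r < count := PySem.Int.mod_lt d (by omega)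
      have hcast : ((count.toNat : Int)) = count := Int.toNat_of_nonneg (by omega)
      have hdecomp : q * count + r = d := by
        rw [hq, hr]; exact PySem.Int.floordiv_mul_add_mod d count
      have hgreedy := pvGreedy_eq count.toNat q r hr0 (by rw [hcast]; exact hrlt)
      rw [hcast] at hgreedy
      rw [hdecomp] at hgreedy
      have hloop := pvIncLoop count.toNat q r.toNat (by omega)
      rw [Int.toNat_of_nonneg hr0] at hloop
      have hsub : count.toNat - r.toNat = (count - r).toNat := by omega
      rw [hloop, hsub, pvPadWhile_eq, hgreedy]
    · -- d ≤ -255: count < 0; A's replicate and remainder loop are empty, B's greedy loop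
      -- does not run; both sides pad [] to eight zeros
      have hcount : count < 0 := by
        rw [hcnt]
        have := (PySem.Int.floordiv_lt_iff_lt_mul (a := d + 254) (b := 255) (q := 0) (by norm_num)).mpr (by omega)
        simpa using this
      obtain ⟨hrlo, hrhi⟩ := PySem.Int.mod_neg_bounds (a := d) hcount
      have h1 : PySem.List.pyRange 0 r 1 = [] := PySem.List.pyRange_one_eq_nil (by omega)
      have h2 : count.toNat = 0 := by omega
      have h3 : pvGreedy count d = [] := by rw [pvGreedy, if_neg (by omega)]
      rw [h1, h2, h3, pvPadWhile_eq]
      simp
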